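-- pv_equiv track=rewrite | github.com/chu-wen-lin/Practical-Data-Structure-Algorithm | Warriors/Warriors.py | warriors
-- ===== SOURCE A (Python) =====
-- from typing import List
--
-- def warriors(strength: List[int], attack_range: List[int]):
--     """
--     Given the attributes of each warriors and output the minimal and maximum
--     index of warrior can be attacked by each warrior.
--
--     Parameters:
--       strength (List[int]): The strength value of N warriors
--       attack_range (List[int]): The range value of N warriors
--
--     Returns:
--       attack_interval (List[int]):
--           The min and the max index that the warrior can attack.
--           The format of output is 2N int array `[a0, b0, a1, b1, ...]`
--     """
--     # self.d = {}
--     N = len(strength)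
--     stack_l = []  # 左邊的stack
--     stack_r = []  # 右邊的stack
--     left = [0] * N  # 裝左邊可攻擊對象最後解
--     right = [(N - 1)] * N  # 裝右邊可攻擊對象最後解
--     output = [None] * (N * 2)
--
--     for i, item in enumerate(strength):
--         if not stack_r:
--             stack_r.append(i)
--             continue
--
--         while stack_r and item >= strength[stack_r[-1]]:
--             loser = stack_r.pop(-1)
--             right[loser] = i - 1
--
--         stack_r.append(i)  # 小於等於:只會做這件事，把自己的index裝進stack
--
--     for j in range(N - 1, -1, -1):
--         if not stack_l:
--             stack_l.append(j)
--             continue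
--
--         while stack_l and strength[j] >= strength[stack_l[-1]]:
--             loserr = stack_l.pop(-1)
--             left[loserr] = j + 1
--
--         stack_l.append(j)
--
--     for x in range(len(left)):
--         diff_l = x - left[x]
--         a = min(diff_l, attack_range[x])
--         left[x] = x - a
--
--     for y in range(len(right)):
--         diff_r = right[y] - y
--         b = min(diff_r, attack_range[y])
--         right[y] = y + b
--
--     output[::2] = left
--     output[1::2] = right
--
--     return output
-- ===== SOURCE B (Python) =====
-- from typing import List
--
-- def warriors(strength: List[int], attack_range: List[int]):
--     N = len(strength)
--     out = []
--     for x in range(N):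
--         s = strength[x]
--         lb = next((j + 1 for j in range(x - 1, -1, -1) if strength[j] >= s), 0)
--         rb = next((j - 1 for j in range(x + 1, N) if strength[j] >= s), N - 1)
--         a = min(x - lb, attack_range[x])
--         b = min(rb - x, attack_range[x])
--         out.append(x - a)
--         out.append(x + b)
--     return out
-- ===== Notes on version B (the rewrite author's own statement) =====
-- stated objective: simpler
-- what changed: Replaced the two monotonic-stack passes (plus two clamp passes and interleaved slice assignment) by a single loop that, for each warrior, scans directly left and right for the first warrior at least as strong and emits the clamped interval bounds in order.
import Mathlib
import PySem

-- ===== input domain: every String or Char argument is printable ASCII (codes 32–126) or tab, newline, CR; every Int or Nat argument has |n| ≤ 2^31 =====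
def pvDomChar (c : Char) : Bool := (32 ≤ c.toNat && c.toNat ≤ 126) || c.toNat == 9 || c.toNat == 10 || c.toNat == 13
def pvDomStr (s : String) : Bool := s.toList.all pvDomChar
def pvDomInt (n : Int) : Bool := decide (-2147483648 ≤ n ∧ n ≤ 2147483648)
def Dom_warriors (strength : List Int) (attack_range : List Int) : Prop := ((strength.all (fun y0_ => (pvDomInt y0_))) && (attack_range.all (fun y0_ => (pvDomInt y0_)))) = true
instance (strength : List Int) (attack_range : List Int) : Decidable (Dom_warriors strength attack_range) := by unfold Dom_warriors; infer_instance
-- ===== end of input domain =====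

-- B replaces A's two monotonic-stack passes by a direct per-index scan for the first
-- blocking warrior on each side (simpler; O(n^2) worst case instead of A's O(n)).

-- ===== PORT A =====
-- the inner `while stack_r and item >= strength[stack_r[-1]]: loser = stack_r.pop(-1); right[loser] = i - 1`
def pvPopR (s : List Int) (i : Nat) : List Nat → List Int → List Nat × List Int
  | [], right => ([], right)
  | top :: rest, right =>
      if s.getD top 0 ≤ s.getD i 0 then pvPopR s i rest (right.set top ((i : Int) - 1))
      else (top :: rest, right)

-- one iteration of `for i, item in enumerate(strength)` (empty-stack branch kept)
def pvStepR (s : List Int) (acc : List Nat × List Int) (i : Nat) : List Nat × List Int :=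
  match acc.1 with
  | [] => (i :: acc.1, acc.2)
  | _ :: _ =>
      let p := pvPopR s i acc.1 acc.2
      (i :: p.1, p.2)

-- the inner `while stack_l and strength[j] >= strength[stack_l[-1]]: loserr = stack_l.pop(-1); left[loserr] = j + 1`
def pvPopL (s : List Int) (j : Nat) : List Nat → List Int → List Nat × List Int
  | [], left => ([], left)
  | top :: rest, left =>
      if s.getD top 0 ≤ s.getD j 0 then pvPopL s j rest (left.set top ((j : Int) + 1))
      else (top :: rest, left)

-- one iteration of `for j in range(N - 1, -1, -1)`
def pvStepL (s : List Int) (acc : List Nat × List Int) (j : Nat) : List Nat × List Int :=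
  match acc.1 with
  | [] => (j :: acc.1, acc.2)
  | _ :: _ =>
      let p := pvPopL s j acc.1 acc.2
      (j :: p.1, p.2)

def warriors (strength : List Int) (attack_range : List Int) : List Int :=
  let N := strength.length
  -- first loop: forward over enumerate(strength), stack_r
  let right := ((List.range N).foldl (pvStepR strength) ([], List.replicate N ((N : Int) - 1))).2
  -- second loop: range(N-1, -1, -1), stack_l
  let left := (((List.range N).reverse).foldl (pvStepL strength) ([], List.replicate N 0)).2
  -- third loop: left[x] = x - min(x - left[x], attack_range[x])
  let left' := (List.range N).map (fun (x : Nat) =>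
    (x : Int) - min ((x : Int) - left.getD x 0) (attack_range.getD x 0))
  -- fourth loop: right[y] = y + min(right[y] - y, attack_range[y])
  let right' := (List.range N).map (fun (y : Nat) =>
    (y : Int) + min (right.getD y 0 - (y : Int)) (attack_range.getD y 0))
  -- output[::2] = left; output[1::2] = right  (interleave)
  (left'.zip right').flatMap (fun p => [p.1, p.2])

-- ===== PORT B =====
-- `next((j + 1 for j in range(x - 1, -1, -1) if strength[j] >= s), 0)`
def pvHitL (strength : List Int) (x : Nat) : Option Nat :=
  ((List.range x).reverse).find? (fun j => decide (strength.getD x 0 ≤ strength.getD j 0))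

def pvScanL (strength : List Int) (x : Nat) : Nat :=
  match pvHitL strength x with
  | some j => j + 1
  | none => 0

-- `next((j - 1 for j in range(x + 1, N) if strength[j] >= s), N - 1)`
def pvHitR (strength : List Int) (x : Nat) : Option Nat :=
  (List.range' (x + 1) (strength.length - (x + 1))).find? (fun j => decide (strength.getD x 0 ≤ strength.getD j 0))

def pvScanR (strength : List Int) (x : Nat) : Int :=
  match pvHitR strength x with
  | some j => (j : Int) - 1
  | none => (strength.length : Int) - 1

def warriors_alt (strength : List Int) (attack_range : List Int) : List Int :=
  (List.range strength.length).foldl (fun out x =>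
    let lb := pvScanL strength x
    let rb := pvScanR strength x
    let a := min ((x : Int) - (lb : Int)) (attack_range.getD x 0)
    let b := min (rb - (x : Int)) (attack_range.getD x 0)
    out ++ [(x : Int) - a, (x : Int) + b]) []

-- ===== PRECONDITION & SPEC =====
-- A raises IndexError (attack_range[x]) when attack_range is shorter than strength; excluded.
def Pre_warriors (strength : List Int) (attack_range : List Int) : Prop :=
  strength.length ≤ attack_range.length
instance (strength : List Int) (attack_range : List Int) : Decidable (Pre_warriors strength attack_range) := by unfold Pre_warriors; infer_instance

def pvWitness_warriors : List Int × List Int := ([3, 1, 2, 2], [1, 1, 2, 1])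

def Spec_warriors (strength : List Int) (attack_range : List Int) (out : List Int) : Prop := out = warriors_alt strength attack_range
instance (strength : List Int) (attack_range : List Int) (out : List Int) : Decidable (Spec_warriors strength attack_range out) := by unfold Spec_warriors; infer_instance

-- ===== CLAIM (what is proved, stated in full; the proofs are below) =====
def Claim_equal_warriors : Prop := ∀ (strength : List Int) (attack_range : List Int), Dom_warriors strength attack_range → Pre_warriors strength attack_range → Spec_warriors strength attack_range (warriors strength attack_range)

-- ===== LEMMAS AND PROOFS =====

-- `nge s x` = smallest j > x with s[j] ≥ s[x], or s.length if none (proof-side view of pvScanR)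
def nge (s : List Int) (x : Nat) : Nat :=
  match pvHitR s x with
  | some j => j
  | none => s.length

-- generic facts about find? on an increasing index range
theorem find?_range'_some {p : Nat → Bool} {a n j : Nat}
    (h : (List.range' a n).find? p = some j) :
    p j = true ∧ a ≤ j ∧ j < a + n ∧ ∀ t, a ≤ t → t < j → p t = false := by
  rw [List.find?_range'_eq_some] at h
  obtain ⟨h1, h2, h3⟩ := h
  rw [List.mem_range'_1] at h2
  exact ⟨h1, h2.1, h2.2, fun t ht1 ht2 => by simpa using h3 t ht1 ht2⟩

theorem find?_range'_none {p : Nat → Bool} {a n : Nat}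
    (h : (List.range' a n).find? p = none) :
    ∀ t, a ≤ t → t < a + n → p t = false := by
  intro t h1 h2
  have := List.find?_eq_none.mp h t (by rw [List.mem_range'_1]; omega)
  simpa using this

theorem find?_revRange_some {p : Nat → Bool} {x j : Nat}
    (h : ((List.range x).reverse).find? p = some j) :
    p j = true ∧ j < x ∧ ∀ t, j < t → t < x → p t = false := by
  induction x with
  | zero => simp at h
  | succ x ih =>
    rw [List.range_succ, List.reverse_append] at h
    simp only [List.reverse_singleton, List.singleton_append, List.find?_cons] at h
    by_cases hpx : p x
    · rw [hpx] at h
      cases h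
      exact ⟨hpx, by omega, fun t h1 h2 => by omega⟩
    · rw [Bool.eq_false_iff.mpr hpx] at h
      obtain ⟨hj, hjx, hall⟩ := ih h
      refine ⟨hj, by omega, ?_⟩
      intro t h1 h2
      rcases Nat.eq_or_lt_of_le (Nat.lt_succ_iff.mp h2) with rfl | hlt
      · simpa using hpx
      · exact hall t h1 hlt

theorem find?_revRange_none {p : Nat → Bool} {x : Nat}
    (h : ((List.range x).reverse).find? p = none) :
    ∀ t, t < x → p t = false := by
  intro t h1
  have := List.find?_eq_none.mp h t (by rw [List.mem_reverse, List.mem_range]; omega)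
  simpa using this

-- clean views of pvHitL / pvHitR
theorem hitR_some {s : List Int} {x j : Nat} (hf : pvHitR s x = some j) :
    s.getD x 0 ≤ s.getD j 0 ∧ x < j ∧ j < s.length ∧
    ∀ t, x < t → t < j → s.getD t 0 < s.getD x 0 := by
  unfold pvHitR at hf
  obtain ⟨hp, h1, h2, hall⟩ := find?_range'_some hf
  refine ⟨by simpa using hp, by omega, by omega, ?_⟩
  intro t ht1 ht2
  have := hall t (by omega) ht2
  simp at this
  exact this

theorem hitR_none {s : List Int} {x : Nat} (hf : pvHitR s x = none) :
    ∀ t, x < t → t < s.length → s.getD t 0 < s.getD x 0 := by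
  intro t ht1 ht2
  unfold pvHitR at hf
  have := find?_range'_none hf t (by omega) (by omega)
  simp at this
  exact this

theorem hitL_some {s : List Int} {x j : Nat} (hf : pvHitL s x = some j) :
    s.getD x 0 ≤ s.getD j 0 ∧ j < x ∧
    ∀ t, j < t → t < x → s.getD t 0 < s.getD x 0 := by
  unfold pvHitL at hf
  obtain ⟨hp, h1, hall⟩ := find?_revRange_some hf
  refine ⟨by simpa using hp, h1, ?_⟩
  intro t ht1 ht2
  have := hall t ht1 ht2
  simp at this
  exact this

theorem hitL_none {s : List Int} {x : Nat} (hf : pvHitL s x = none) :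
    ∀ t, t < x → s.getD t 0 < s.getD x 0 := by
  intro t ht
  unfold pvHitL at hf
  have := find?_revRange_none hf t ht
  simp at this
  exact this

-- facts about nge
theorem lt_nge {s : List Int} {x : Nat} (hx : x < s.length) : x < nge s x := by
  cases hf : pvHitR s x with
  | none => simp only [nge, hf]; exact hx
  | some j => simp only [nge, hf]; exact (hitR_some hf).2.1

theorem nge_pred {s : List Int} {x : Nat} (h : nge s x < s.length) :
    s.getD x 0 ≤ s.getD (nge s x) 0 ∧ x < nge s x := by
  cases hf : pvHitR s x with
  | none => simp only [nge, hf] at h; exact absurd h (lt_irrefl _)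
  | some j =>
    simp only [nge, hf]
    exact ⟨(hitR_some hf).1, (hitR_some hf).2.1⟩

theorem nge_eq_of {s : List Int} {x k : Nat} (hx : x < k) (hk : k < s.length)
    (h1 : k ≤ nge s x) (h2 : s.getD x 0 ≤ s.getD k 0) : nge s x = k := by
  cases hf : pvHitR s x with
  | none =>
    have := hitR_none hf k hx hk
    omega
  | some j =>
    simp only [nge, hf] at h1 ⊢
    by_contra hne
    have := (hitR_some hf).2.2.2 k hx (by omega)
    omega

theorem lt_of_lt_nge {s : List Int} {x j : Nat} (hxj : x < j) (hj : j < nge s x) :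
    s.getD j 0 < s.getD x 0 := by
  cases hf : pvHitR s x with
  | none =>
    simp only [nge, hf] at hj
    exact hitR_none hf j hxj hj
  | some m =>
    simp only [nge, hf] at hj
    exact (hitR_some hf).2.2.2 j hxj hj

-- facts about pvScanL (the left boundary)
theorem scanL_le (s : List Int) (x : Nat) : pvScanL s x ≤ x := by
  cases hf : pvHitL s x with
  | none => simp only [pvScanL, hf]; exact Nat.zero_le _
  | some j => simp only [pvScanL, hf]; exact (hitL_some hf).2.1

theorem scanL_pred {s : List Int} {x j : Nat} (h : pvScanL s x = j + 1) :
    s.getD x 0 ≤ s.getD j 0 ∧ j < x := by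
  cases hf : pvHitL s x with
  | none => simp only [pvScanL, hf] at h; omega
  | some m =>
    simp only [pvScanL, hf] at h
    obtain rfl : m = j := by omega
    exact ⟨(hitL_some hf).1, (hitL_some hf).2.1⟩

theorem scanL_eq_of {s : List Int} {x j : Nat} (hle : pvScanL s x ≤ j + 1) (hjx : j < x)
    (hs : s.getD x 0 ≤ s.getD j 0) : pvScanL s x = j + 1 := by
  cases hf : pvHitL s x with
  | none =>
    have := hitL_none hf j hjx
    omega
  | some m =>
    simp only [pvScanL, hf] at hle ⊢
    by_contra hne
    have := (hitL_some hf).2.2 j (by omega) hjx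
    omega

theorem lt_of_scanL_le {s : List Int} {x k t : Nat} (hle : pvScanL s x ≤ k) (hkt : k ≤ t)
    (htx : t < x) : s.getD t 0 < s.getD x 0 := by
  cases hf : pvHitL s x with
  | none => exact hitL_none hf t htx
  | some m =>
    simp only [pvScanL, hf] at hle
    exact (hitL_some hf).2.2 t (by omega) htx

theorem scanR_eq (s : List Int) (x : Nat) :
    pvScanR s x = if nge s x < s.length then (nge s x : Int) - 1 else (s.length : Int) - 1 := by
  cases hf : pvHitR s x with
  | none => simp only [pvScanR, nge, hf]; rw [if_neg (lt_irrefl _)]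
  | some j =>
    simp only [pvScanR, nge, hf]
    rw [if_pos (hitR_some hf).2.2.1]

-- behaviour of the right-pop loop on a valid stack
theorem popR_spec (s : List Int) (k : Nat) (hk : k < s.length) :
    ∀ (st : List Nat) (right : List Int),
    st.Pairwise (fun a b => b < a) →
    (∀ x ∈ st, x < k ∧ k ≤ nge s x) →
    right.length = s.length →
    (pvPopR s k st right).1 = st.filter (fun x => decide (k + 1 ≤ nge s x)) ∧
    (pvPopR s k st right).2.length = s.length ∧
    ∀ t, (pvPopR s k st right).2.getD t 0 =
      if t ∈ st ∧ nge s t = k then (k : Int) - 1 else right.getD t 0 := by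
  intro st
  induction st with
  | nil =>
    intro right _ _ hlen
    refine ⟨by simp [pvPopR], by simpa [pvPopR] using hlen, ?_⟩
    intro t
    rw [if_neg (by simp)]
    simp [pvPopR]
  | cons top rest ih =>
    intro right hpair hmem hlen
    obtain ⟨hrel, hpair'⟩ := List.pairwise_cons.mp hpair
    have htop := hmem top (List.mem_cons_self)
    have htopnotin : top ∉ rest := fun hmm => absurd (hrel top hmm) (lt_irrefl _)
    by_cases hpop : s.getD top 0 ≤ s.getD k 0
    · have hng : nge s top = k := nge_eq_of htop.1 hk htop.2 hpop
      have e : pvPopR s k (top :: rest) right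
          = if s.getD top 0 ≤ s.getD k 0 then pvPopR s k rest (right.set top ((k : Int) - 1))
            else (top :: rest, right) := rfl
      rw [e, if_pos hpop]
      obtain ⟨ih1, ih2, ih3⟩ := ih (right.set top ((k : Int) - 1)) hpair'
        (fun x hx => hmem x (List.mem_cons_of_mem _ hx)) (by simpa using hlen)
      refine ⟨?_, ih2, ?_⟩
      · rw [ih1, List.filter_cons, if_neg (by simp [hng])]
      · intro u
        rw [ih3 u]
        by_cases ht : u = top
        · subst ht
          rw [if_neg (fun hc => htopnotin hc.1), if_pos ⟨List.mem_cons_self, hng⟩]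
          have htlen : u < right.length := by rw [hlen]; omega
          simp [List.getD_eq_getElem?_getD, List.getElem?_set_self htlen]
        · by_cases ht2 : u ∈ rest ∧ nge s u = k
          · rw [if_pos ht2, if_pos ⟨List.mem_cons_of_mem _ ht2.1, ht2.2⟩]
          · rw [if_neg ht2, if_neg (by
              rintro ⟨hm, hng2⟩
              rcases List.mem_cons.mp hm with rfl | hm'
              · exact ht rfl
              · exact ht2 ⟨hm', hng2⟩)]
            simp [List.getD_eq_getElem?_getD, List.getElem?_set_ne (fun h => ht h.symm)]
    · have e : pvPopR s k (top :: rest) right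
          = if s.getD top 0 ≤ s.getD k 0 then pvPopR s k rest (right.set top ((k : Int) - 1))
            else (top :: rest, right) := rfl
      rw [e, if_neg hpop]
      have hks : s.getD k 0 < s.getD top 0 := lt_of_not_ge hpop
      have hngtop : k + 1 ≤ nge s top := by
        have hne : nge s top ≠ k := by
          intro h
          have := (nge_pred (s := s) (x := top) (h ▸ hk)).1
          rw [h] at this
          omega
        omega
      have hrest : ∀ y ∈ rest, k + 1 ≤ nge s y := by
        intro y hy
        have hylt : y < top := hrel y hy
        have hymem := hmem y (List.mem_cons_of_mem _ hy)
        have hsy : s.getD top 0 < s.getD y 0 := lt_of_lt_nge hylt (by omega)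
        have hne : nge s y ≠ k := by
          intro h
          have := (nge_pred (s := s) (x := y) (h ▸ hk)).1
          rw [h] at this
          omega
        omega
      refine ⟨?_, hlen, ?_⟩
      · rw [List.filter_eq_self.mpr]
        intro a ha
        rcases List.mem_cons.mp ha with rfl | ha'
        · simpa using hngtop
        · simpa using hrest a ha'
      · intro u
        rw [if_neg]
        rintro ⟨hm, hng2⟩
        rcases List.mem_cons.mp hm with rfl | hm'
        · omega
        · have := hrest u hm'
          omega

-- invariant of the first (right) loop after processing indices < k
def InvR (s : List Int) (k : Nat) (acc : List Nat × List Int) : Prop :=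
  acc.1 = ((List.range k).filter (fun x => decide (k ≤ nge s x))).reverse ∧
  acc.2.length = s.length ∧
  ∀ x, x < s.length →
    acc.2.getD x 0 = if nge s x < k then (nge s x : Int) - 1 else ((s.length : Int) - 1)

theorem stepR_uniform (s : List Int) (acc : List Nat × List Int) (k : Nat) :
    pvStepR s acc k = (k :: (pvPopR s k acc.1 acc.2).1, (pvPopR s k acc.1 acc.2).2) := by
  obtain ⟨st, r⟩ := acc
  cases st with
  | nil => rfl
  | cons a l => rfl

theorem stepR_inv {s : List Int} {k : Nat} {acc : List Nat × List Int}
    (hk : k < s.length) (h : InvR s k acc) : InvR s (k + 1) (pvStepR s acc k) := by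
  obtain ⟨h1, h2, h3⟩ := h
  rw [InvR, stepR_uniform]
  have hpair : acc.1.Pairwise (fun a b => b < a) := by
    rw [h1, List.pairwise_reverse]
    exact List.Pairwise.filter _ (List.pairwise_lt_range)
  have hmem : ∀ x ∈ acc.1, x < k ∧ k ≤ nge s x := by
    intro x hx
    rw [h1, List.mem_reverse, List.mem_filter, List.mem_range] at hx
    exact ⟨hx.1, by simpa using hx.2⟩
  obtain ⟨p1, p2, p3⟩ := popR_spec s k hk acc.1 acc.2 hpair hmem h2
  refine ⟨?_, p2, ?_⟩
  · show k :: (pvPopR s k acc.1 acc.2).1 = _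
    rw [p1, h1, List.filter_reverse]
    have hff : List.filter (fun x => decide (k + 1 ≤ nge s x))
          (List.filter (fun x => decide (k ≤ nge s x)) (List.range k))
        = List.filter (fun x => decide (k + 1 ≤ nge s x)) (List.range k) := by
      rw [List.filter_filter]
      apply List.filter_congr
      intro x _
      by_cases hx : k + 1 ≤ nge s x
      · simp [hx]; omega
      · simp [hx]
    rw [hff, List.range_succ, List.filter_append, List.reverse_append]
    have hkk : List.filter (fun x => decide (k + 1 ≤ nge s x)) [k] = [k] := by
      simp [List.filter_cons]
      exact lt_nge hk
    rw [hkk, List.reverse_singleton, List.singleton_append]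
  · intro x hx
    show (pvPopR s k acc.1 acc.2).2.getD x 0 = _
    rw [p3 x]
    by_cases hng : nge s x = k
    · have hxk : x < k := hng ▸ lt_nge hx
      have hxin : x ∈ acc.1 := by
        rw [h1, List.mem_reverse, List.mem_filter, List.mem_range]
        exact ⟨hxk, by simp [hng]⟩
      rw [if_pos ⟨hxin, hng⟩, if_pos (by omega), hng]
    · rw [if_neg (fun hc => hng hc.2), h3 x hx]
      by_cases h4 : nge s x < k
      · rw [if_pos h4, if_pos (by omega)]
      · rw [if_neg h4, if_neg (by omega)]

theorem loopR_inv (s : List Int) :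
    ∀ k, k ≤ s.length →
    InvR s k ((List.range k).foldl (pvStepR s)
      ([], List.replicate s.length ((s.length : Int) - 1))) := by
  intro k
  induction k with
  | zero =>
    intro _
    refine ⟨by simp, by simp, ?_⟩
    intro x hx
    rw [if_neg (Nat.not_lt_zero _)]
    simp [List.getD_eq_getElem?_getD, hx]
  | succ k ih =>
    intro hk
    rw [List.range_succ, List.foldl_append, List.foldl_cons, List.foldl_nil]
    exact stepR_inv (by omega) (ih (by omega))

theorem rightFinal_eq {s : List Int} {x : Nat} (hx : x < s.length) :
    (((List.range s.length).foldl (pvStepR s)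
        ([], List.replicate s.length ((s.length : Int) - 1))).2).getD x 0 = pvScanR s x := by
  rw [(loopR_inv s s.length (le_refl _)).2.2 x hx, scanR_eq]

-- behaviour of the left-pop loop on a valid stack
theorem popL_spec (s : List Int) (k : Nat) (_hk : k < s.length) :
    ∀ (st : List Nat) (left : List Int),
    st.Pairwise (fun a b => a < b) →
    (∀ x ∈ st, k < x ∧ x < s.length ∧ pvScanL s x ≤ k + 1) →
    left.length = s.length →
    (pvPopL s k st left).1 = st.filter (fun x => decide (pvScanL s x ≤ k)) ∧
    (pvPopL s k st left).2.length = s.length ∧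
    ∀ t, (pvPopL s k st left).2.getD t 0 =
      if t ∈ st ∧ pvScanL s t = k + 1 then (k : Int) + 1 else left.getD t 0 := by
  intro st
  induction st with
  | nil =>
    intro left _ _ hlen
    refine ⟨by simp [pvPopL], by simpa [pvPopL] using hlen, ?_⟩
    intro t
    rw [if_neg (by simp)]
    simp [pvPopL]
  | cons top rest ih =>
    intro left hpair hmem hlen
    obtain ⟨hrel, hpair'⟩ := List.pairwise_cons.mp hpair
    have htop := hmem top (List.mem_cons_self)
    have htopnotin : top ∉ rest := fun hmm => absurd (hrel top hmm) (lt_irrefl _)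
    by_cases hpop : s.getD top 0 ≤ s.getD k 0
    · have hlb : pvScanL s top = k + 1 := scanL_eq_of htop.2.2 htop.1 hpop
      have e : pvPopL s k (top :: rest) left
          = if s.getD top 0 ≤ s.getD k 0 then pvPopL s k rest (left.set top ((k : Int) + 1))
            else (top :: rest, left) := rfl
      rw [e, if_pos hpop]
      obtain ⟨ih1, ih2, ih3⟩ := ih (left.set top ((k : Int) + 1)) hpair'
        (fun x hx => hmem x (List.mem_cons_of_mem _ hx)) (by simpa using hlen)
      refine ⟨?_, ih2, ?_⟩
      · rw [ih1, List.filter_cons, if_neg (by simp [hlb])]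
      · intro u
        rw [ih3 u]
        by_cases ht : u = top
        · subst ht
          rw [if_neg (fun hc => htopnotin hc.1), if_pos ⟨List.mem_cons_self, hlb⟩]
          have htlen : u < left.length := by rw [hlen]; omega
          simp [List.getD_eq_getElem?_getD, List.getElem?_set_self htlen]
        · by_cases ht2 : u ∈ rest ∧ pvScanL s u = k + 1
          · rw [if_pos ht2, if_pos ⟨List.mem_cons_of_mem _ ht2.1, ht2.2⟩]
          · rw [if_neg ht2, if_neg (by
              rintro ⟨hm, hlb2⟩
              rcases List.mem_cons.mp hm with rfl | hm'
              · exact ht rfl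
              · exact ht2 ⟨hm', hlb2⟩)]
            simp [List.getD_eq_getElem?_getD, List.getElem?_set_ne (fun h => ht h.symm)]
    · have e : pvPopL s k (top :: rest) left
          = if s.getD top 0 ≤ s.getD k 0 then pvPopL s k rest (left.set top ((k : Int) + 1))
            else (top :: rest, left) := rfl
      rw [e, if_neg hpop]
      have hks : s.getD k 0 < s.getD top 0 := lt_of_not_ge hpop
      have hlbtop : pvScanL s top ≤ k := by
        have hne : pvScanL s top ≠ k + 1 := by
          intro h
          have := (scanL_pred h).1
          omega
        omega
      have hrest : ∀ y ∈ rest, pvScanL s y ≤ k := by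
        intro y hy
        have hylt : top < y := hrel y hy
        have hymem := hmem y (List.mem_cons_of_mem _ hy)
        have hsy : s.getD top 0 < s.getD y 0 :=
          lt_of_scanL_le hymem.2.2 (by omega) hylt
        have hne : pvScanL s y ≠ k + 1 := by
          intro h
          have := (scanL_pred h).1
          omega
        omega
      refine ⟨?_, hlen, ?_⟩
      · rw [List.filter_eq_self.mpr]
        intro a ha
        rcases List.mem_cons.mp ha with rfl | ha'
        · simpa using hlbtop
        · simpa using hrest a ha'
      · intro u
        rw [if_neg]
        rintro ⟨hm, hlb2⟩
        rcases List.mem_cons.mp hm with rfl | hm'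
        · omega
        · have := hrest u hm'
          omega

-- invariant of the second (left) loop after processing indices ≥ k
def InvL (s : List Int) (k : Nat) (acc : List Nat × List Int) : Prop :=
  acc.1 = (List.range' k (s.length - k)).filter (fun x => decide (pvScanL s x ≤ k)) ∧
  acc.2.length = s.length ∧
  ∀ x, x < s.length →
    acc.2.getD x 0 = if k < pvScanL s x then (pvScanL s x : Int) else 0

theorem stepL_uniform (s : List Int) (acc : List Nat × List Int) (k : Nat) :
    pvStepL s acc k = (k :: (pvPopL s k acc.1 acc.2).1, (pvPopL s k acc.1 acc.2).2) := by
  obtain ⟨st, r⟩ := acc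
  cases st with
  | nil => rfl
  | cons a l => rfl

theorem stepL_inv {s : List Int} {k : Nat} {acc : List Nat × List Int}
    (hk : k < s.length) (h : InvL s (k + 1) acc) : InvL s k (pvStepL s acc k) := by
  obtain ⟨h1, h2, h3⟩ := h
  rw [InvL, stepL_uniform]
  have hpair : acc.1.Pairwise (fun a b => a < b) := by
    rw [h1]
    exact List.Pairwise.filter _ (List.pairwise_lt_range')
  have hmem : ∀ x ∈ acc.1, k < x ∧ x < s.length ∧ pvScanL s x ≤ k + 1 := by
    intro x hx
    rw [h1, List.mem_filter, List.mem_range'_1] at hx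
    refine ⟨by omega, by omega, by simpa using hx.2⟩
  obtain ⟨p1, p2, p3⟩ := popL_spec s k hk acc.1 acc.2 hpair hmem h2
  refine ⟨?_, p2, ?_⟩
  · show k :: (pvPopL s k acc.1 acc.2).1 = _
    rw [p1, h1]
    have hff : List.filter (fun x => decide (pvScanL s x ≤ k))
          (List.filter (fun x => decide (pvScanL s x ≤ k + 1)) (List.range' (k + 1) (s.length - (k + 1))))
        = List.filter (fun x => decide (pvScanL s x ≤ k)) (List.range' (k + 1) (s.length - (k + 1))) := by
      rw [List.filter_filter]
      apply List.filter_congr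
      intro x _
      by_cases hx : pvScanL s x ≤ k
      · simp [hx]; omega
      · simp [hx]
    rw [hff]
    have hsk : s.length - k = (s.length - (k + 1)) + 1 := by omega
    rw [hsk, List.range'_succ, List.filter_cons, if_pos (by simpa using scanL_le s k)]
  · intro x hx
    show (pvPopL s k acc.1 acc.2).2.getD x 0 = _
    rw [p3 x]
    by_cases hc : pvScanL s x = k + 1
    · have hxin : x ∈ acc.1 := by
        rw [h1, List.mem_filter, List.mem_range'_1]
        have := scanL_le s x
        refine ⟨by omega, by simp [hc]⟩
      rw [if_pos ⟨hxin, hc⟩, if_pos (by omega), hc]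
      push_cast
      ring
    · rw [if_neg (fun hcc => hc hcc.2), h3 x hx]
      by_cases h4 : k + 1 < pvScanL s x
      · rw [if_pos h4, if_pos (by omega)]
      · rw [if_neg h4, if_neg (by omega)]

theorem loopL_inv (s : List Int) :
    ∀ m, m ≤ s.length →
    InvL s (s.length - m) (((List.range' (s.length - m) m).reverse).foldl (pvStepL s)
      ([], List.replicate s.length 0)) := by
  intro m
  induction m with
  | zero =>
    intro _
    refine ⟨by simp, by simp, ?_⟩
    intro x hx
    rw [if_neg (by have := scanL_le s x; omega)]
    simp [List.getD_eq_getElem?_getD, hx]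
  | succ m ih =>
    intro hm
    rw [List.range'_succ, List.reverse_cons, List.foldl_append, List.foldl_cons, List.foldl_nil]
    have e1 : s.length - (m + 1) + 1 = s.length - m := by omega
    rw [e1]
    exact stepL_inv (by omega) (by rw [← e1] at ih ⊢; exact ih (by omega))

theorem leftFinal_eq {s : List Int} {x : Nat} (hx : x < s.length) :
    ((((List.range s.length).reverse).foldl (pvStepL s)
        ([], List.replicate s.length 0)).2).getD x 0 = (pvScanL s x : Int) := by
  have h := loopL_inv s s.length (le_refl _)
  rw [Nat.sub_self] at h
  rw [List.range_eq_range'] at *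
  rw [h.2.2 x hx]
  by_cases h0 : 0 < pvScanL s x
  · rw [if_pos h0]
  · rw [if_neg h0]
    omega

-- fold shape of warriors_alt
theorem foldl_append_flat {α β : Type} (f : List β → α → List β) (g : α → List β)
    (hf : ∀ out x, f out x = out ++ g x) :
    ∀ (l : List α) (init : List β), l.foldl f init = init ++ l.flatMap g := by
  intro l
  induction l with
  | nil => intro init; simp
  | cons a l ih =>
    intro init
    rw [List.foldl_cons, hf, ih, List.flatMap_cons, List.append_assoc]

theorem flatMap_map_own {α β γ : Type} (l : List α) (f : α → β) (g : β → List γ) :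
    (l.map f).flatMap g = l.flatMap (fun x => g (f x)) := by
  induction l with
  | nil => rfl
  | cons a l ih => simp [List.flatMap_cons, ih]

theorem flatMap_congr_mem {α β : Type} (l : List α) (f g : α → List β)
    (h : ∀ x ∈ l, f x = g x) : l.flatMap f = l.flatMap g := by
  induction l with
  | nil => rfl
  | cons a l ih =>
    rw [List.flatMap_cons, List.flatMap_cons, h a (List.mem_cons_self),
      ih (fun x hx => h x (List.mem_cons_of_mem _ hx))]

-- ===== VERDICT (by name: the statement is the Claim_ definition above) =====
theorem warriors_spec : Claim_equal_warriors := by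
  unfold Claim_equal_warriors
  intro strength attack_range _ _
  unfold Spec_warriors
  have hA : warriors strength attack_range
      = (List.range strength.length).flatMap (fun (x : Nat) =>
          [(x : Int) - min ((x : Int) -
              ((((List.range strength.length).reverse).foldl (pvStepL strength)
                ([], List.replicate strength.length 0)).2).getD x 0) (attack_range.getD x 0),
           (x : Int) + min ((((List.range strength.length).foldl (pvStepR strength)
                ([], List.replicate strength.length ((strength.length : Int) - 1))).2).getD x 0
              - (x : Int)) (attack_range.getD x 0)]) := by
    simp only [warriors]
    rw [List.zip_map']
    rw [flatMap_map_own]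
  have hB : warriors_alt strength attack_range
      = (List.range strength.length).flatMap (fun (x : Nat) =>
          [(x : Int) - min ((x : Int) - (pvScanL strength x : Int)) (attack_range.getD x 0),
           (x : Int) + min (pvScanR strength x - (x : Int)) (attack_range.getD x 0)]) := by
    unfold warriors_alt
    rw [foldl_append_flat _ (fun (x : Nat) =>
          [(x : Int) - min ((x : Int) - (pvScanL strength x : Int)) (attack_range.getD x 0),
           (x : Int) + min (pvScanR strength x - (x : Int)) (attack_range.getD x 0)])
        (fun out x => rfl), List.nil_append]
  rw [hA, hB]
  apply flatMap_congr_mem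
  intro x hx
  rw [List.mem_range] at hx
  rw [leftFinal_eq hx, rightFinal_eq hx]
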